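-- pv_equiv track=rewrite | github.com/leafotario/Baphomet | cogs/iceberg/repository.py | _is_busy_error
-- ===== SOURCE A (Python) =====
-- def _is_busy_error(exc: BaseException) -> bool:
--     message = str(exc).casefold()
--     return any(
--         phrase in message
--         for phrase in (
--             "database is locked",
--             "database is busy",
--             "database table is locked",
--             "database schema is locked",
--         )
--     )
-- ===== SOURCE B (Python) =====
-- def _is_busy_error(exc: BaseException) -> bool:
--     # One left-to-right scan over the message: at each position where the shared
--     # prefix "database" occurs, test the four possible continuations.
--     message = str(exc).casefold()
--     tails = (" is locked", " is busy", " table is locked", " schema is locked")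
--     for i in range(len(message)):
--         s = message[i:]
--         if s.startswith("database") and any(s[8:].startswith(t) for t in tails):
--             return True
--     return False
-- ===== Notes on version B (the rewrite author's own statement) =====
-- stated objective: alternative
-- what changed: Instead of four independent whole-message substring scans, B makes a single left-to-right scan over the suffixes of the message, matching the shared eight-character prefix once per position and then testing the four tail continuations with startswith.
import Mathlib
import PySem

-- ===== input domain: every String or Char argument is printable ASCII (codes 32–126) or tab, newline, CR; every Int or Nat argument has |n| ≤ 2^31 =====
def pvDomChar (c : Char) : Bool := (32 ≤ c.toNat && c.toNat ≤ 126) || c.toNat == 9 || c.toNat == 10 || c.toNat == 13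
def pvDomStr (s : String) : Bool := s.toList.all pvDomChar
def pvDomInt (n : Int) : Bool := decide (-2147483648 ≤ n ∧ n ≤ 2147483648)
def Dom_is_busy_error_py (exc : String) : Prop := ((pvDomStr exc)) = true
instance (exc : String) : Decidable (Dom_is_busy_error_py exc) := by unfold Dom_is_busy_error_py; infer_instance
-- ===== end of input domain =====

-- B replaces A's four independent substring ('in') scans by one scan over the message's
-- suffixes, matching the shared prefix "database" once per position and then the four
-- tails (objective: alternative). On the ASCII domain str.casefold = str.lower.

-- ===== PORT A =====
-- message = str(exc).casefold(); any(phrase in message for phrase in (...))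
def is_busy_error_py (exc : String) : Bool :=
  let message := PySem.Str.lower exc
  ["database is locked", "database is busy",
   "database table is locked", "database schema is locked"].any
    (fun phrase => PySem.Str.isIn phrase message)

-- ===== PORT B =====
-- s.startswith("database") and any(s[8:].startswith(t) for t in tails)
def altCheck (s : List Char) : Bool :=
  PySem.Chars.startswith s "database".toList &&
  [" is locked", " is busy", " table is locked", " schema is locked"].any
    (fun t => PySem.Chars.startswith (s.drop 8) t.toList)

-- for i in range(len(message)): s = message[i:] … — structural scan over the suffixes
def altScan : List Char → Bool
  | [] => false
  | c :: rest => altCheck (c :: rest) || altScan rest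

def is_busy_error_py_alt (exc : String) : Bool :=
  altScan (PySem.Str.lower exc).toList

-- ===== PRECONDITION & SPEC =====
def Spec_is_busy_error_py (exc : String) (out : Bool) : Prop := out = is_busy_error_py_alt exc
instance (exc : String) (out : Bool) : Decidable (Spec_is_busy_error_py exc out) := by unfold Spec_is_busy_error_py; infer_instance

-- ===== CLAIM (what is proved, stated in full; the proofs are below) =====
def Claim_equal_is_busy_error_py : Prop := ∀ (exc : String), Dom_is_busy_error_py exc → Spec_is_busy_error_py exc (is_busy_error_py exc)

-- ===== LEMMAS AND PROOFS =====

-- p ++ t is a prefix of s iff p is and t prefixes what follows p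
theorem pv_prefix_append_split (p t s : List Char) :
    (p ++ t <+: s) ↔ (p <+: s ∧ t <+: s.drop p.length) := by
  constructor
  · rintro ⟨u, rfl⟩
    refine ⟨⟨t ++ u, by simp⟩, ?_⟩
    rw [List.append_assoc, List.drop_left]
    exact ⟨u, rfl⟩
  · rintro ⟨⟨v, rfl⟩, ht⟩
    rw [List.drop_left] at ht
    obtain ⟨u, rfl⟩ := ht
    exact ⟨u, by simp⟩

theorem pv_infix_iff (sub s : List Char) : sub <:+: s ↔ ∃ j, sub <+: s.drop j := by
  rw [← PySem.Chars.isIn_iff_infix, ← PySem.Chars.exists_prefix_drop_iff_isIn]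

theorem pv_altScan_iff (s : List Char) :
    altScan s = true ↔ ∃ j, altCheck (s.drop j) = true := by
  induction s with
  | nil =>
    constructor
    · intro h; exact absurd h (by decide)
    · rintro ⟨j, hj⟩
      rw [List.drop_nil] at hj
      exact absurd hj (by decide)
  | cons c rest ih =>
    simp only [altScan, Bool.or_eq_true, ih]
    constructor
    · rintro (h | ⟨j, hj⟩)
      · exact ⟨0, h⟩
      · exact ⟨j + 1, hj⟩
    · rintro ⟨j, hj⟩
      cases j with
      | zero => exact Or.inl hj
      | succ j => exact Or.inr ⟨j, hj⟩

theorem pv_altCheck_iff (s : List Char) :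
    altCheck s = true ↔
      ∃ t ∈ ([" is locked", " is busy", " table is locked", " schema is locked"] : List String),
        "database".toList ++ t.toList <+: s := by
  simp only [altCheck, Bool.and_eq_true, List.any_eq_true, PySem.Chars.startswith_iff]
  constructor
  · rintro ⟨hd, t, ht, hts⟩
    have hlen : ("database".toList).length = 8 := by decide
    exact ⟨t, ht, (pv_prefix_append_split _ _ _).2 ⟨hd, by rw [hlen]; exact hts⟩⟩
  · rintro ⟨t, ht, h⟩
    obtain ⟨hd, hts⟩ := (pv_prefix_append_split _ _ _).1 h
    have hlen : ("database".toList).length = 8 := by decide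
    exact ⟨hd, t, ht, by rw [hlen] at hts; exact hts⟩

theorem pv_phrase1 : ("database is locked".toList) = "database".toList ++ " is locked".toList := by decide
theorem pv_phrase2 : ("database is busy".toList) = "database".toList ++ " is busy".toList := by decide
theorem pv_phrase3 : ("database table is locked".toList) = "database".toList ++ " table is locked".toList := by decide
theorem pv_phrase4 : ("database schema is locked".toList) = "database".toList ++ " schema is locked".toList := by decide

-- ===== VERDICT (by name: the statement is the Claim_ definition above) =====
theorem is_busy_error_py_spec : Claim_equal_is_busy_error_py := by
  intro exc _
  unfold Spec_is_busy_error_py is_busy_error_py is_busy_error_py_alt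
  rw [Bool.eq_iff_iff]
  simp only [List.any_eq_true, List.mem_cons, List.not_mem_nil, or_false,
    PySem.Str.isIn_iff_infix, pv_altScan_iff, pv_altCheck_iff, pv_infix_iff]
  constructor
  · rintro ⟨p, hp, j, hj⟩
    refine ⟨j, ?_⟩
    rcases hp with rfl | rfl | rfl | rfl
    · exact ⟨" is locked", by simp, by rw [← pv_phrase1]; exact hj⟩
    · exact ⟨" is busy", by simp, by rw [← pv_phrase2]; exact hj⟩
    · exact ⟨" table is locked", by simp, by rw [← pv_phrase3]; exact hj⟩
    · exact ⟨" schema is locked", by simp, by rw [← pv_phrase4]; exact hj⟩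
  · rintro ⟨j, t, ht, h⟩
    rcases ht with rfl | rfl | rfl | rfl
    · exact ⟨"database is locked", Or.inl rfl, j, by rw [pv_phrase1]; exact h⟩
    · exact ⟨"database is busy", Or.inr (Or.inl rfl), j, by rw [pv_phrase2]; exact h⟩
    · exact ⟨"database table is locked", Or.inr (Or.inr (Or.inl rfl)), j, by rw [pv_phrase3]; exact h⟩
    · exact ⟨"database schema is locked", Or.inr (Or.inr (Or.inr rfl)), j, by rw [pv_phrase4]; exact h⟩
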